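-- pv_equiv track=rewrite | github.com/laura-sndr/ORF_finder | orf_finder_code.py | find_start_and_stop_codons
-- ===== SOURCE A (Python) =====
-- def find_start_and_stop_codons(sequence_str, start_codons, stop_codons):
--     start_positions = []  # Initialize an empty list to store start codon positions
--     stop_positions = []  # Initialize an empty list to store stop codon positions
--
--     # Iterate over the DNA sequence in all 3 reading frames
--     for frame in range(3):
--         seq_frame = sequence_str[frame:]  # Extract the sequence in the current reading frame
--         for i in range(0, len(seq_frame), 3):  # Iterate over the sequence in steps of 3 (codon length)
--             codon = seq_frame[i:i + 3]  # Extract a codon (sequence of 3 nucleotides)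
--             if str(codon) in start_codons:  # Check if the codon is a start codon
--                 start_pos = i + frame  # Calculate the start position of the codon
--                 start_positions.append(start_pos)  # Store the start codon position
--             elif str(codon) in stop_codons:  # Check if the codon is a stop codon
--                 stop_pos = i + frame  # Calculate the stop position of the codon
--                 stop_positions.append(stop_pos)  # Store the stop codon position
--
--     return start_positions, stop_positions  # Return lists of start and stop codon positions
-- ===== SOURCE B (Python) =====
-- def find_start_and_stop_codons(sequence_str, start_codons, stop_codons):
--     # One linear pass with modulo bucketing instead of three strided scans.
--     start_buckets = [[], [], []]
--     stop_buckets = [[], [], []]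
--     for p in range(len(sequence_str)):
--         codon = sequence_str[p:p + 3]
--         if codon in start_codons:
--             start_buckets[p % 3].append(p)
--         elif codon in stop_codons:
--             stop_buckets[p % 3].append(p)
--     return (start_buckets[0] + start_buckets[1] + start_buckets[2],
--             stop_buckets[0] + stop_buckets[1] + stop_buckets[2])
-- ===== Notes on version B (the rewrite author's own statement) =====
-- stated objective: alternative
-- what changed: Replaces the three nested strided frame scans (re-slicing the sequence per frame) by a single linear pass over all positions that buckets hits by p % 3 and concatenates the three buckets, reproducing A's frame-grouped order.
import Mathlib
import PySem

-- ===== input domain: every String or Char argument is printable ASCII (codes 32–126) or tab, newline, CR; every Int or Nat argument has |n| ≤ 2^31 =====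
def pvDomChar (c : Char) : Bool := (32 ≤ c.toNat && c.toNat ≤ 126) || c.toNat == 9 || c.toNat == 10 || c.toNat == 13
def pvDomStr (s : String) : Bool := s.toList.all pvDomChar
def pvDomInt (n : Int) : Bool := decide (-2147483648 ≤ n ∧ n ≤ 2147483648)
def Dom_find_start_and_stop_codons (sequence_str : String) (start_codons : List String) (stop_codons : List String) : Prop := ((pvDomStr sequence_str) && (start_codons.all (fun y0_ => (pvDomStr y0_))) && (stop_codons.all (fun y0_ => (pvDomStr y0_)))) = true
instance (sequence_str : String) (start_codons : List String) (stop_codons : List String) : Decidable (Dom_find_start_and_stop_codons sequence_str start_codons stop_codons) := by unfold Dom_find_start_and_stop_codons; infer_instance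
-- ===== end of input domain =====

-- B replaces A's three nested strided frame scans by one linear pass with p % 3 bucketing; alternative decomposition, same asymptotic cost.


-- ===== PORT A =====
-- for frame in range(3): scan the suffix sequence_str[frame:] in steps of 3, appending i+frame
def find_start_and_stop_codons (sequence_str : String) (start_codons : List String) (stop_codons : List String) : List Int × List Int :=
  (PySem.List.pyRange 0 3 1).foldl (fun acc frame =>
    let seq_frame := PySem.Str.slice sequence_str (some frame) none
    (PySem.List.pyRange 0 (PySem.Str.len seq_frame) 3).foldl (fun acc2 i =>
      let codon := PySem.Str.slice seq_frame (some i) (some (i + 3))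
      if codon ∈ start_codons then (acc2.1 ++ [i + frame], acc2.2)
      else if codon ∈ stop_codons then (acc2.1, acc2.2 ++ [i + frame])
      else acc2) acc) ([], [])

-- ===== PORT B =====
-- one pass over p in range(len(sequence_str)), bucketing p by p % 3; buckets concatenated at the end
def find_start_and_stop_codons_alt (sequence_str : String) (start_codons : List String) (stop_codons : List String) : List Int × List Int :=
  let bk := (PySem.List.pyRange 0 (PySem.Str.len sequence_str) 1).foldl
    (fun (bk : (List Int × List Int × List Int) × (List Int × List Int × List Int)) p =>
      let codon := PySem.Str.slice sequence_str (some p) (some (p + 3))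
      if codon ∈ start_codons then
        if PySem.Int.mod p 3 = 0 then ((bk.1.1 ++ [p], bk.1.2.1, bk.1.2.2), bk.2)
        else if PySem.Int.mod p 3 = 1 then ((bk.1.1, bk.1.2.1 ++ [p], bk.1.2.2), bk.2)
        else ((bk.1.1, bk.1.2.1, bk.1.2.2 ++ [p]), bk.2)
      else if codon ∈ stop_codons then
        if PySem.Int.mod p 3 = 0 then (bk.1, (bk.2.1 ++ [p], bk.2.2.1, bk.2.2.2))
        else if PySem.Int.mod p 3 = 1 then (bk.1, (bk.2.1, bk.2.2.1 ++ [p], bk.2.2.2))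
        else (bk.1, (bk.2.1, bk.2.2.1, bk.2.2.2 ++ [p]))
      else bk)
    (([], [], []), ([], [], []))
  (bk.1.1 ++ bk.1.2.1 ++ bk.1.2.2, bk.2.1 ++ bk.2.2.1 ++ bk.2.2.2)

-- ===== PRECONDITION & SPEC =====
def Spec_find_start_and_stop_codons (sequence_str : String) (start_codons : List String) (stop_codons : List String) (out : List Int × List Int) : Prop := out = find_start_and_stop_codons_alt sequence_str start_codons stop_codons
instance (sequence_str : String) (start_codons : List String) (stop_codons : List String) (out : List Int × List Int) : Decidable (Spec_find_start_and_stop_codons sequence_str start_codons stop_codons out) := by unfold Spec_find_start_and_stop_codons; infer_instance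

-- ===== CLAIM (what is proved, stated in full; the proofs are below) =====
def Claim_equal_find_start_and_stop_codons : Prop := ∀ (sequence_str : String) (start_codons : List String) (stop_codons : List String), Dom_find_start_and_stop_codons sequence_str start_codons stop_codons → Spec_find_start_and_stop_codons sequence_str start_codons stop_codons (find_start_and_stop_codons sequence_str start_codons stop_codons)

-- ===== LEMMAS AND PROOFS =====

def codonAt (s : String) (p : Nat) : String := String.ofList ((s.toList.drop p).take 3)

def hitS (s : String) (cods : List String) (p : Nat) : Bool := decide (codonAt s p ∈ cods)

def hitT (s : String) (starts stops : List String) (p : Nat) : Bool :=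
  !hitS s starts p && hitS s stops p

def bucket (s : String) (r : Nat) (F : Nat → Bool) : List Int :=
  (((List.range s.toList.length).filter (fun p => p % 3 == r)).filter F).map (fun p : Nat => (p : Int))

theorem slice_eq_codonAt (s : String) (p : Nat) :
    PySem.Str.slice s (some (p : Int)) (some ((p : Int) + 3)) = codonAt s p := by
  apply String.toList_inj.mp
  simp [codonAt, PySem.Str.toList_slice, PySem.Chars.slice_eq_listSlice]
  rw [show ((p:Int) + 3) = ((p:Int) + ((3:Nat):Int)) by norm_num,
      PySem.List.slice_natCast_add]

theorem frame_slice_eq_codonAt (s : String) (f p : Nat) (hfp : f ≤ p) :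
    PySem.Str.slice (PySem.Str.slice s (some (f : Int)) none)
      (some ((p : Int) - f)) (some ((p : Int) - f + 3)) = codonAt s p := by
  apply String.toList_inj.mp
  simp [codonAt, PySem.Str.toList_slice, PySem.Chars.slice_eq_listSlice]
  rw [show ((p:Int) - f) = (((p - f : Nat) : Int)) by push_cast [hfp]; ring,
      show (((p - f : Nat):Int) + 3) = (((p - f : Nat):Int) + ((3:Nat):Int)) by norm_num,
      PySem.List.slice_natCast_add, List.drop_drop]
  congr 2
  omega

theorem range_filter_mod_eq (n f : Nat) (hf : f < 3) :
    PySem.List.pyRange 0 ((n - f : Nat) : Int) 3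
      = ((List.range n).filter (fun p => p % 3 == f)).map (fun p : Nat => (p : Int) - (f : Int)) := by
  have h1 : ((List.range n).filter (fun p => p % 3 == f))
      = (List.range ((n - f + 2) / 3)).map (fun k => f + 3 * k) := by
    induction n with
    | zero => simp
    | succ m ih =>
      rw [List.range_succ, List.filter_append, ih]
      by_cases hm : m % 3 = f
      · have hc : (m + 1 - f + 2) / 3 = (m - f + 2) / 3 + 1 := by omega
        have hv : f + 3 * ((m - f + 2) / 3) = m := by omega
        simp [hm, hc, List.range_succ, hv]
      · have hc : (m + 1 - f + 2) / 3 = (m - f + 2) / 3 := by omega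
        simp [hm, hc]
  rw [h1, PySem.List.pyRange_of_pos 0 _ (by norm_num), List.map_map]
  by_cases hn : f < n
  · have hlt : (0:Int) < ((n - f : Nat) : Int) := by omega
    have hc : ((((n - f : Nat) : Int) - 0 + 3 - 1) / 3).toNat = (n - f + 2) / 3 := by omega
    rw [if_pos hlt, hc]
    apply List.map_congr_left
    intro k _
    simp only [Function.comp_apply]
    push_cast
    ring
  · rw [if_neg (by omega)]
    have : (n - f + 2) / 3 = 0 := by omega
    simp [this]

def stepAB (S T : Nat → Bool) (acc : List Int × List Int) (p : Nat) : List Int × List Int :=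
  if S p then (acc.1 ++ [(p : Int)], acc.2)
  else if T p then (acc.1, acc.2 ++ [(p : Int)])
  else acc

theorem foldAB (S T : Nat → Bool) (L : List Nat) (a b : List Int) :
    L.foldl (stepAB S T) (a, b)
      = (a ++ (L.filter S).map (fun p : Nat => (p : Int)),
         b ++ (L.filter (fun p => !S p && T p)).map (fun p : Nat => (p : Int))) := by
  induction L generalizing a b with
  | nil => simp
  | cons p L ih =>
    by_cases hS : S p <;> by_cases hT : T p <;>
      simp [stepAB, hS, hT, ih, List.append_assoc]

-- A's inner loop for frame f collects exactly bucket f of the start/stop hits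
theorem frameA (s : String) (starts stops : List String) (f : Nat) (hf : f < 3)
    (a b : List Int) :
    (PySem.List.pyRange 0 (PySem.Str.len (PySem.Str.slice s (some (f : Int)) none)) 3).foldl
      (fun acc2 i =>
        if PySem.Str.slice (PySem.Str.slice s (some (f : Int)) none) (some i) (some (i + 3)) ∈ starts then (acc2.1 ++ [i + (f : Int)], acc2.2)
        else if PySem.Str.slice (PySem.Str.slice s (some (f : Int)) none) (some i) (some (i + 3)) ∈ stops then (acc2.1, acc2.2 ++ [i + (f : Int)])
        else acc2) (a, b)
    = (a ++ bucket s f (hitS s starts), b ++ bucket s f (hitT s starts stops)) := by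
  have hlen : PySem.Str.len (PySem.Str.slice s (some (f : Int)) none)
      = ((s.toList.length - f : Nat) : Int) := by
    simp [PySem.Str.len_eq, PySem.Str.toList_slice, PySem.Chars.slice_eq_listSlice,
      PySem.List.slice_from_natCast]
  rw [hlen, range_filter_mod_eq _ f hf, List.foldl_map]
  rw [PySem.List.foldl_congr_mem _ _
      (fun acc p => stepAB (hitS s starts) (hitS s stops) acc p) (a, b) ?_]
  · rw [foldAB]
    simp [bucket, hitT, List.filter_filter]
  · intro acc p hp
    have hpf : p % 3 = f := by
      have := List.of_mem_filter hp
      simpa using this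
    have hfp : f ≤ p := by omega
    simp only [frame_slice_eq_codonAt s f p hfp, stepAB, hitS]
    have : (p : Int) - f + f = (p : Int) := by ring
    rw [this]
    by_cases h1 : codonAt s p ∈ starts <;> by_cases h2 : codonAt s p ∈ stops <;>
      simp [h1, h2]

def step6 (S T : Nat → Bool)
    (acc : (List Int × List Int × List Int) × (List Int × List Int × List Int)) (p : Nat) :
    (List Int × List Int × List Int) × (List Int × List Int × List Int) :=
  if S p then
    (if p % 3 = 0 then (acc.1.1 ++ [(p : Int)], acc.1.2.1, acc.1.2.2)
     else if p % 3 = 1 then (acc.1.1, acc.1.2.1 ++ [(p : Int)], acc.1.2.2)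
     else (acc.1.1, acc.1.2.1, acc.1.2.2 ++ [(p : Int)]), acc.2)
  else if T p then
    (acc.1,
     if p % 3 = 0 then (acc.2.1 ++ [(p : Int)], acc.2.2.1, acc.2.2.2)
     else if p % 3 = 1 then (acc.2.1, acc.2.2.1 ++ [(p : Int)], acc.2.2.2)
     else (acc.2.1, acc.2.2.1, acc.2.2.2 ++ [(p : Int)]))
  else acc

def bucketL (L : List Nat) (r : Nat) (F : Nat → Bool) : List Int :=
  ((L.filter (fun p => p % 3 == r)).filter F).map (fun p : Nat => (p : Int))

theorem fold6 (S T : Nat → Bool) (L : List Nat)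
    (a0 a1 a2 b0 b1 b2 : List Int) :
    L.foldl (step6 S T) ((a0, a1, a2), (b0, b1, b2))
      = ((a0 ++ bucketL L 0 S, a1 ++ bucketL L 1 S, a2 ++ bucketL L 2 S),
         (b0 ++ bucketL L 0 (fun p => !S p && T p), b1 ++ bucketL L 1 (fun p => !S p && T p),
          b2 ++ bucketL L 2 (fun p => !S p && T p))) := by
  induction L generalizing a0 a1 a2 b0 b1 b2 with
  | nil => simp [bucketL]
  | cons p L ih =>
    have h3 : p % 3 = 0 ∨ p % 3 = 1 ∨ p % 3 = 2 := by omega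
    by_cases hS : S p <;> by_cases hT : T p <;>
      rcases h3 with h3 | h3 | h3 <;>
      simp [step6, hS, hT, h3, ih, bucketL, List.append_assoc]

theorem main_eq (sequence_str : String) (start_codons stop_codons : List String) :
    find_start_and_stop_codons sequence_str start_codons stop_codons
      = find_start_and_stop_codons_alt sequence_str start_codons stop_codons := by
  have h012 : PySem.List.pyRange 0 3 1 = [0, 1, 2] := by decide
  have hA : find_start_and_stop_codons sequence_str start_codons stop_codons
      = (bucket sequence_str 0 (hitS sequence_str start_codons)
          ++ bucket sequence_str 1 (hitS sequence_str start_codons)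
          ++ bucket sequence_str 2 (hitS sequence_str start_codons),
         bucket sequence_str 0 (hitT sequence_str start_codons stop_codons)
          ++ bucket sequence_str 1 (hitT sequence_str start_codons stop_codons)
          ++ bucket sequence_str 2 (hitT sequence_str start_codons stop_codons)) := by
    simp only [find_start_and_stop_codons, h012, List.foldl_cons, List.foldl_nil]
    have e0 := fun a b => frameA sequence_str start_codons stop_codons 0 (by norm_num) a b
    have e1 := fun a b => frameA sequence_str start_codons stop_codons 1 (by norm_num) a b
    have e2 := fun a b => frameA sequence_str start_codons stop_codons 2 (by norm_num) a b
    simp only [Nat.cast_zero, Nat.cast_one, Nat.cast_ofNat] at e0 e1 e2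
    rw [e0, e1, e2]
    simp [List.append_assoc]
  have hlen : PySem.Str.len sequence_str = ((sequence_str.toList.length : Nat) : Int) := by
    simp [PySem.Str.len_eq]
  have hB : find_start_and_stop_codons_alt sequence_str start_codons stop_codons
      = (bucket sequence_str 0 (hitS sequence_str start_codons)
          ++ bucket sequence_str 1 (hitS sequence_str start_codons)
          ++ bucket sequence_str 2 (hitS sequence_str start_codons),
         bucket sequence_str 0 (hitT sequence_str start_codons stop_codons)
          ++ bucket sequence_str 1 (hitT sequence_str start_codons stop_codons)
          ++ bucket sequence_str 2 (hitT sequence_str start_codons stop_codons)) := by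
    rw [find_start_and_stop_codons_alt, hlen, PySem.List.pyRange_zero_natCast, List.foldl_map]
    rw [PySem.List.foldl_congr_mem _ _
        (fun acc p => step6 (hitS sequence_str start_codons) (hitS sequence_str stop_codons) acc p)
        (([], [], []), ([], [], [])) ?_]
    · rw [fold6]
      simp [bucket, bucketL, hitT, List.append_assoc]
    · intro acc p hp
      simp only [slice_eq_codonAt sequence_str p, step6, hitS]
      have d0 : ((3:Int) ∣ (p:Int)) = ((p % 3 : Nat) = 0) := propext (by omega)
      have d1 : (((p:Int)) % 3 = 1) = ((p % 3 : Nat) = 1) := propext (by omega)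
      by_cases h1 : codonAt sequence_str p ∈ start_codons <;>
        by_cases h2 : codonAt sequence_str p ∈ stop_codons <;>
        simp [h1, h2, d0, d1] <;> split_ifs <;> rfl
  rw [hA, hB]

-- ===== VERDICT (by name: the statement is the Claim_ definition above) =====
theorem find_start_and_stop_codons_spec : Claim_equal_find_start_and_stop_codons := by
  intro sequence_str start_codons stop_codons _
  exact main_eq sequence_str start_codons stop_codons
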